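-- pv_equiv track=rewrite | github.com/yu845685201/stock_yuzh | backend/src/compliance/report_generator.py | _analyze_data_source_issues
-- ===== SOURCE A (Python) =====
-- from typing import Dict, Any, List
--
-- def _analyze_data_source_issues(validation_results: Dict) -> List[str]:
--     """分析数据源问题"""
--     issues = []
--     violations = validation_results.get('violations', [])
--
--     if any(v.get('type') == 'unauthorized_source' for v in violations):
--         issues.append('未授权数据源')
--
--     if any(v.get('type') == 'mock_data_detected' for v in violations):
--         issues.append('Mock数据使用')
--
--     return issues
-- ===== SOURCE B (Python) =====
-- from typing import Dict, List
--
-- def _analyze_data_source_issues(validation_results: Dict) -> List[str]: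
--     """分析数据源问题 (one fused loop with two flags and early exit)"""
--     unauthorized = False
--     mock = False
--     for v in validation_results.get('violations', []):
--         t = v.get('type')
--         if t == 'unauthorized_source':
--             unauthorized = True
--         elif t == 'mock_data_detected':
--             mock = True
--         if unauthorized and mock:
--             break
--     return ((['未授权数据源'] if unauthorized else [])
--             + (['Mock数据使用'] if mock else []))
-- ===== Notes on version B (the rewrite author's own statement) =====
-- stated objective: alternative
-- what changed: B replaces A's two independent any()-scans over the violations list by one fused loop that classifies each violation's type once into two boolean flags (with early exit once both are set) and assembles the result from the flags.
import Mathlib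
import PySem

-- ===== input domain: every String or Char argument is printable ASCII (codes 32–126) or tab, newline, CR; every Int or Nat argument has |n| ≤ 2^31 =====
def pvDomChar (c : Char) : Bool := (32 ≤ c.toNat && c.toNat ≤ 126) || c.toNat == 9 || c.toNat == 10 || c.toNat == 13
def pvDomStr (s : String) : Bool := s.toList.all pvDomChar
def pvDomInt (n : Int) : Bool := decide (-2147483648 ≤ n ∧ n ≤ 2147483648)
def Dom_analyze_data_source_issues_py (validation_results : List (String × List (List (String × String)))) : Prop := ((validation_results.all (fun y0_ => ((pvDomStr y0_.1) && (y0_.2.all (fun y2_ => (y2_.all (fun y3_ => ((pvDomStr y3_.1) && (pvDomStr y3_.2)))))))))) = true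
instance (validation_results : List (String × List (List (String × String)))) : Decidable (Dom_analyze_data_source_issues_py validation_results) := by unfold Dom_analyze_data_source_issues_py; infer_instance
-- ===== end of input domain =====

-- ===== PORT A =====
-- B fuses A's two any()-scans into one flag-accumulating loop with early exit (alternative; return value only).
def analyze_data_source_issues_py (validation_results : List (String × List (List (String × String)))) : List String :=
  let issues : List String := []
  let violations := PySem.Dict.getD (PySem.Dict.mk validation_results) "violations" []
  let issues := if violations.any (fun v => PySem.Dict.get? (PySem.Dict.mk v) "type" == some "unauthorized_source")
    then issues ++ ["未授权数据源"] else issues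
  let issues := if violations.any (fun v => PySem.Dict.get? (PySem.Dict.mk v) "type" == some "mock_data_detected")
    then issues ++ ["Mock数据使用"] else issues
  issues

-- ===== PORT B =====
-- the for-loop of Source B: two flags, elif classification, break once both are set
def pvFlagsLoop (vs : List (List (String × String))) (unauthorized mock : Bool) : Bool × Bool :=
  match vs with
  | [] => (unauthorized, mock)
  | v :: rest =>
    let t := PySem.Dict.get? (PySem.Dict.mk v) "type"
    let unauthorized := if t == some "unauthorized_source" then true else unauthorized
    let mock := if !(t == some "unauthorized_source") && (t == some "mock_data_detected") then true else mock
    if unauthorized && mock then (unauthorized, mock) else pvFlagsLoop rest unauthorized mock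

def analyze_data_source_issues_py_alt (validation_results : List (String × List (List (String × String)))) : List String :=
  let flags := pvFlagsLoop (PySem.Dict.getD (PySem.Dict.mk validation_results) "violations" []) false false
  (if flags.1 then ["未授权数据源"] else []) ++ (if flags.2 then ["Mock数据使用"] else [])

-- ===== PRECONDITION & SPEC =====
-- A is total (it never raises): Pre_ excludes nothing; it only names the 'violations' entry both programs read.
def Pre_analyze_data_source_issues_py (validation_results : List (String × List (List (String × String)))) : Prop :=
  PySem.Dict.getD (PySem.Dict.mk validation_results) "violations" [] = PySem.Dict.getD (PySem.Dict.mk validation_results) "violations" []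
instance (validation_results : List (String × List (List (String × String)))) : Decidable (Pre_analyze_data_source_issues_py validation_results) := by unfold Pre_analyze_data_source_issues_py; infer_instance
def pvWitness_analyze_data_source_issues_py : (List (String × List (List (String × String)))) := [("violations", [[("type", "unauthorized_source")]])]
def Spec_analyze_data_source_issues_py (validation_results : List (String × List (List (String × String)))) (out : List String) : Prop := out = analyze_data_source_issues_py_alt validation_results
instance (validation_results : List (String × List (List (String × String)))) (out : List String) : Decidable (Spec_analyze_data_source_issues_py validation_results out) := by unfold Spec_analyze_data_source_issues_py; infer_instance

-- ===== CLAIM (what is proved, stated in full; the proofs are below) =====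
def Claim_equal_analyze_data_source_issues_py : Prop := ∀ (validation_results : List (String × List (List (String × String)))), Dom_analyze_data_source_issues_py validation_results → Pre_analyze_data_source_issues_py validation_results → Spec_analyze_data_source_issues_py validation_results (analyze_data_source_issues_py validation_results)

-- ===== LEMMAS AND PROOFS =====

-- the fused loop computes exactly the two any()-scans (flags absorbed by ||)
theorem pvFlagsLoop_eq_any (vs : List (List (String × String))) (u m : Bool) :
    pvFlagsLoop vs u m =
      (u || vs.any (fun v => PySem.Dict.get? (PySem.Dict.mk v) "type" == some "unauthorized_source"),
       m || vs.any (fun v => PySem.Dict.get? (PySem.Dict.mk v) "type" == some "mock_data_detected")) := by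
  induction vs generalizing u m with
  | nil => simp [pvFlagsLoop]
  | cons v rest ih =>
    simp only [pvFlagsLoop, List.any_cons]
    cases u <;> cases m <;>
      by_cases h1 : PySem.Dict.get? (PySem.Dict.mk v) "type" == some "unauthorized_source" <;>
        by_cases h2 : PySem.Dict.get? (PySem.Dict.mk v) "type" == some "mock_data_detected" <;>
          first
            | (simp only [beq_iff_eq] at h1 h2; exact absurd (h1 ▸ h2) (by decide))
            | simp [h1, h2, ih]

-- ===== VERDICT (by name: the statement is the Claim_ definition above) =====
theorem analyze_data_source_issues_py_spec : Claim_equal_analyze_data_source_issues_py := by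
  intro vr _ _
  unfold Spec_analyze_data_source_issues_py analyze_data_source_issues_py analyze_data_source_issues_py_alt
  simp only [pvFlagsLoop_eq_any, Bool.false_or]
  split <;> split <;> simp_all
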